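-- pv_equiv track=rewrite | github.com/Chemokoren/Algorithms-1 | calculate_number_of_to_build_a_wall.py | solution
-- ===== SOURCE A (Python) =====
-- def solution(H):
--     stack, count = [], 1
--     for i in H:
--         if stack:
--             if i == stack[-1]:
--                 continue
--             if i < stack[-1]:
--                 while stack and stack[-1] > i:
--                     stack.pop()
--             if stack:
--                 if i > stack[-1]:
--                     count+=1
--                     stack.append(i)
--             else:
--                 count+=1
--                 stack.append(i)
--         else:
--             stack.append(i)
--     return count
-- ===== SOURCE B (Python) =====
-- def solution(H):
--     # Counts the rectangles directly: position j starts a new rectangle unless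
--     # its height is a suffix-minimum of the prefix H[:j] (i.e. an earlier equal
--     # height with nothing lower in between).
--     count = 0
--     for j, x in enumerate(H):
--         new = True
--         k = j - 1
--         while k >= 0 and H[k] >= x:
--             if H[k] == x:
--                 new = False
--                 break
--             k -= 1
--         if new:
--             count += 1
--     return count
-- ===== Notes on version B (the rewrite author's own statement) =====
-- stated objective: alternative
-- what changed: Replaces A's monotonic stack with a direct quadratic count: a position starts a new rectangle unless its height is a suffix-minimum of the preceding prefix (an earlier equal height with nothing lower in between), checked by a backward scan.
-- intended difference: On the empty list A returns its initialisation value 1 (a leftover of starting count at 1 before any push) while B returns the intended 0 rectangles for an empty wall. — e.g. on solution([]): A returns 1, B returns 0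
import Mathlib
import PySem

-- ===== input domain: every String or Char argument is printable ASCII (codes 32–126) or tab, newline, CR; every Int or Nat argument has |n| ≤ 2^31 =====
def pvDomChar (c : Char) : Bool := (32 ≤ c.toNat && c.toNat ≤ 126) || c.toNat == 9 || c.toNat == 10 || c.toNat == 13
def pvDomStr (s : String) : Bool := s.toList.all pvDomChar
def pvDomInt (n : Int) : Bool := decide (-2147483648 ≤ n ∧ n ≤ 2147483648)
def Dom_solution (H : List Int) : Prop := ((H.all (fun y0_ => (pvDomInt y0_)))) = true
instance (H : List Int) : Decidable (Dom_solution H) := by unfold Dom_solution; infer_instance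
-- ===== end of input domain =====

-- B replaces A's monotonic stack by a direct per-position backward scan (alternative
-- algorithm, same values except on [] where B returns the intended 0).

-- ===== PORT A =====
-- the inner `while stack and stack[-1] > i: stack.pop()` (stack head-first: head = top)
def popA (i : Int) : List Int → List Int
  | [] => []
  | t :: r => if t > i then popA i r else t :: r

-- one iteration of A's for-loop over state (stack, count)
def stepA (p : List Int × Int) (i : Int) : List Int × Int :=
  match p with
  | (stack, count) =>
    match stack with
    | [] => (i :: stack, count)
    | t :: _ =>
      if i = t then (stack, count)
      else
        let stack1 := if i < t then popA i stack else stack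
        match stack1 with
        | [] => ([i], count + 1)
        | t1 :: _ => if i > t1 then (i :: stack1, count + 1) else (stack1, count)

def solution (H : List Int) : Int := (H.foldl stepA ([], 1)).2

-- ===== PORT B =====
-- B's inner while-loop: scan the (reversed) prefix while entries ≥ x, looking for an equal one
def seenB (x : Int) : List Int → Bool
  | [] => false
  | k :: r => if k ≥ x then (if k = x then true else seenB x r) else false

-- B's for-loop: rp is the reversed prefix already processed
def goB (rp : List Int) : List Int → Int
  | [] => 0
  | x :: rest => (if seenB x rp then 0 else 1) + goB (x :: rp) rest

def solution_alt (H : List Int) : Int := goB [] H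

-- ===== PRECONDITION & SPEC =====
-- On the empty wall A returns its initialisation value 1 while B returns the intended 0
-- rectangles; everywhere else they agree.
def D_solution (H : List Int) : Prop := H = []
instance (H : List Int) : Decidable (D_solution H) := by unfold D_solution; infer_instance

def Spec_solution (H : List Int) (out : Int) : Prop := ¬ D_solution H → out = solution_alt H
instance (H : List Int) (out : Int) : Decidable (Spec_solution H out) := by unfold Spec_solution; infer_instance

def pvDiffWitness_solution : List Int := []
def pvDiffWitnessOut_solution : Int × Int := (1, 0)

-- ===== CLAIM (what is proved, stated in full; the proofs are below) =====
def Claim_unchanged_solution : Prop := ∀ (H : List Int), Dom_solution H → Spec_solution H (solution H)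
def Claim_changed_solution : Prop := Dom_solution (pvDiffWitness_solution) ∧ D_solution (pvDiffWitness_solution) ∧ solution (pvDiffWitness_solution) = pvDiffWitnessOut_solution.1 ∧ solution_alt (pvDiffWitness_solution) = pvDiffWitnessOut_solution.2 ∧ pvDiffWitnessOut_solution.1 ≠ pvDiffWitnessOut_solution.2
def Claim_exact_solution : Prop := ∀ (H : List Int), Dom_solution H → D_solution H → solution H ≠ solution_alt H

-- ===== LEMMAS AND PROOFS =====

-- model of A's stack after processing rp.reverse (head = top)
def M : List Int → List Int
  | [] => []
  | x :: rp => x :: (M rp).dropWhile (fun t => decide (x ≤ t))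

theorem popA_eq_dropWhile (i : Int) (l : List Int) :
    popA i l = l.dropWhile (fun t => decide (i < t)) := by
  induction l with
  | nil => rfl
  | cons t r ih =>
    simp only [popA, List.dropWhile]
    by_cases h : t > i
    · simp [h, ih, show i < t from h]
    · simp [h, show ¬ i < t from h]

theorem dropWhile_dropWhile {p q : Int → Bool} (h : ∀ a, q a = true → p a = true)
    (l : List Int) : (l.dropWhile q).dropWhile p = l.dropWhile p := by
  induction l with
  | nil => rfl
  | cons a r ih =>
    by_cases hq : q a = true
    · have hp := h a hq
      simp [List.dropWhile, hq, hp, ih]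
    · simp [List.dropWhile, hq]

theorem dropWhile_all_lt (x : Int) (l : List Int) (hl : l.Pairwise (· > ·)) :
    ∀ a ∈ l.dropWhile (fun t => decide (x ≤ t)), a < x := by
  induction l with
  | nil => simp
  | cons h t ih =>
    intro a ha
    by_cases hx : x ≤ h
    · simp only [List.dropWhile, decide_eq_true_eq, hx, if_pos, decide_true] at ha
      exact ih hl.of_cons a (by simpa [hx] using ha)
    · simp only [List.dropWhile, show decide (x ≤ h) = false by simp [hx]] at ha
      rcases List.mem_cons.mp ha with rfl | hmem
      · omega
      · have := (List.pairwise_cons.mp hl).1 a hmem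
        omega

theorem M_pairwise (rp : List Int) : (M rp).Pairwise (· > ·) := by
  induction rp with
  | nil => exact List.Pairwise.nil
  | cons x r ih =>
    simp only [M]
    refine List.pairwise_cons.mpr ⟨?_, ih.sublist (List.dropWhile_sublist _)⟩
    intro a ha
    exact dropWhile_all_lt x (M r) ih a ha

-- seenB answers: does the popped stack expose an element equal to x?
theorem seenB_iff (x : Int) (rp : List Int) :
    seenB x rp = true ↔ ((M rp).dropWhile (fun t => decide (x < t))).head? = some x := by
  induction rp with
  | nil => simp [seenB, M]
  | cons k r ih =>
    simp only [seenB]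
    by_cases hk : k ≥ x
    · by_cases he : k = x
      · subst he
        rw [if_pos hk, if_pos rfl]
        simp [M, List.dropWhile, show ¬ (k < k) by omega]
      · have hlt : x < k := by omega
        rw [if_pos hk, if_neg he, ih]
        simp only [M, List.dropWhile, show decide (x < k) = true by simp [hlt]]
        rw [dropWhile_dropWhile (fun a ha => by simp at *; omega)]
    · have hnx : ¬ x < k := by omega
      rw [if_neg hk]
      simp [M, List.dropWhile, hnx]
      omega

-- one step of A, started on the model stack of a nonempty prefix, matches B's per-element count
theorem stepA_model (x k : Int) (r : List Int) (c : Int) :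
    stepA (M (k :: r), c) x =
      (M (x :: k :: r), c + (if seenB x (k :: r) then 0 else 1)) := by
  have hpair := M_pairwise (k :: r)
  obtain ⟨t, srest, hcons⟩ : ∃ t s, M (k :: r) = t :: s := ⟨_, _, rfl⟩
  have hiff := seenB_iff x (k :: r)
  show stepA (M (k :: r), c) x =
      (x :: (M (k :: r)).dropWhile (fun a => decide (x ≤ a)), c + (if seenB x (k :: r) then 0 else 1))
  rw [hcons] at hpair hiff ⊢
  by_cases hxt : x = t
  · -- equal to top: no change, seenB true
    subst hxt
    have hseen : seenB x (k :: r) = true := by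
      rw [hiff]
      simp [List.dropWhile, show ¬ (x < x) by omega]
    have hrest : srest.dropWhile (fun a => decide (x ≤ a)) = srest := by
      cases srest with
      | nil => rfl
      | cons b bs =>
        have hb : x > b := (List.pairwise_cons.mp hpair).1 b (List.mem_cons_self ..)
        simp [List.dropWhile, show ¬ x ≤ b by omega]
    simp [stepA, hseen, List.dropWhile, hrest]
  · -- x ≠ top
    have hstack1 : (if x < t then popA x (t :: srest) else (t :: srest)) =
        (t :: srest).dropWhile (fun a => decide (x < a)) := by
      by_cases hlt : x < t
      · rw [if_pos hlt, popA_eq_dropWhile]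
      · rw [if_neg hlt]
        simp [List.dropWhile, hlt]
    simp only [stepA, if_neg hxt]
    rw [hstack1]
    rcases hdes : (t :: srest).dropWhile (fun a => decide (x < a)) with _ | ⟨t1, r1⟩
    · -- popped everything
      have hall : ∀ a ∈ (t :: srest), x < a := by
        intro a ha
        have := List.dropWhile_eq_nil_iff.mp hdes
        simpa using this a ha
      have hseen : seenB x (k :: r) = false := by
        rw [← Bool.not_eq_true, hiff, hdes]; simp
      have hdle : (t :: srest).dropWhile (fun a => decide (x ≤ a)) = [] := by
        apply List.dropWhile_eq_nil_iff.mpr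
        intro a ha
        have := hall a ha
        simp; omega
      rw [hdle, hseen]
      simp
    · have ht1 : ¬ (x < t1) := by
        have := List.head?_dropWhile_not (p := fun a => decide (x < a)) (t :: srest)
        rw [hdes] at this
        simpa using this
      have hsub : (t1 :: r1).Pairwise (· > ·) :=
        hpair.sublist (hdes ▸ List.dropWhile_sublist _)
      by_cases he : t1 = x
      · -- exposed equal element: no push, seenB true
        subst t1
        have hseen : seenB x (k :: r) = true := by rw [hiff, hdes]; rfl
        have hdle : (t :: srest).dropWhile (fun a => decide (x ≤ a)) = r1 := by
          have h1 : (t :: srest).dropWhile (fun a => decide (x ≤ a)) =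
              ((t :: srest).dropWhile (fun a => decide (x < a))).dropWhile
                (fun a => decide (x ≤ a)) := by
            rw [dropWhile_dropWhile]
            intro a ha; simp at *; omega
          rw [h1, hdes]
          simp only [List.dropWhile, show decide (x ≤ x) = true by simp]
          cases r1 with
          | nil => rfl
          | cons b bs =>
            have hb : x > b := (List.pairwise_cons.mp hsub).1 b (List.mem_cons_self ..)
            simp [List.dropWhile, show ¬ x ≤ b by omega]
        rw [hdle, hseen]
        simp [show ¬ x > x by omega]
      · -- exposed smaller element: push
        have ht1x : t1 < x := by omega
        have hseen : seenB x (k :: r) = false := by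
          rw [← Bool.not_eq_true, hiff, hdes]
          simp [he]
        have hdle : (t :: srest).dropWhile (fun a => decide (x ≤ a)) = t1 :: r1 := by
          have h1 : (t :: srest).dropWhile (fun a => decide (x ≤ a)) =
              ((t :: srest).dropWhile (fun a => decide (x < a))).dropWhile
                (fun a => decide (x ≤ a)) := by
            rw [dropWhile_dropWhile]
            intro a ha; simp at *; omega
          rw [h1, hdes]
          simp [List.dropWhile, show ¬ x ≤ t1 by omega]
        rw [hdle, hseen]
        simp [show x > t1 by omega]

theorem foldl_model (rest : List Int) : ∀ (k : Int) (r : List Int) (c : Int),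
    (rest.foldl stepA (M (k :: r), c)).2 = c + goB (k :: r) rest := by
  induction rest with
  | nil => intro k r c; simp [goB]
  | cons x rest ih =>
    intro k r c
    simp only [List.foldl_cons, stepA_model, goB]
    rw [ih x (k :: r)]
    by_cases h : seenB x (k :: r) <;> simp [h] <;> ring

theorem solution_eq_alt (H : List Int) (h : H ≠ []) : solution H = solution_alt H := by
  cases H with
  | nil => exact absurd rfl h
  | cons x rest =>
    have hstep : stepA ([], 1) x = (M [x], 1) := rfl
    have hseen : seenB x [] = false := rfl
    simp only [solution, solution_alt, List.foldl_cons, hstep, goB, hseen]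
    rw [foldl_model rest x [] 1]
    simp

-- ===== VERDICT (by name: the statement is the Claim_ definition above) =====
theorem solution_spec : Claim_unchanged_solution := by
  intro H _ hD
  exact solution_eq_alt H hD

theorem solution_changed : Claim_changed_solution := by
  unfold Claim_changed_solution; decide

theorem solution_tight : Claim_exact_solution := by
  intro H _ hD
  subst hD
  decide
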